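-- pv_equiv track=rewrite | github.com/BoulderDS/feature-importance | analysis.py | get_vocab_size
-- ===== SOURCE A (Python) =====
-- from collections import defaultdict, OrderedDict, Counter
--
-- def get_vocab_size(test_tokens):
--     d = defaultdict(lambda:0)
--     for row in test_tokens:
--         for token in row.split():
--             d[token] += 1
--     values = list(d.values())
--     total = 0
--     for v in values:
--         total += v
--     return total
-- ===== SOURCE B (Python) =====
-- def get_vocab_size(test_tokens):
--     total = 0
--     for row in test_tokens:
--         total += len(row.split())
--     return total
-- ===== Notes on version B (the rewrite author's own statement) =====
-- stated objective: simpler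
-- what changed: B drops A's per-token frequency dictionary entirely and keeps only a running total of per-row split lengths, since the sum of all token counts equals the total token count.
import Mathlib
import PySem

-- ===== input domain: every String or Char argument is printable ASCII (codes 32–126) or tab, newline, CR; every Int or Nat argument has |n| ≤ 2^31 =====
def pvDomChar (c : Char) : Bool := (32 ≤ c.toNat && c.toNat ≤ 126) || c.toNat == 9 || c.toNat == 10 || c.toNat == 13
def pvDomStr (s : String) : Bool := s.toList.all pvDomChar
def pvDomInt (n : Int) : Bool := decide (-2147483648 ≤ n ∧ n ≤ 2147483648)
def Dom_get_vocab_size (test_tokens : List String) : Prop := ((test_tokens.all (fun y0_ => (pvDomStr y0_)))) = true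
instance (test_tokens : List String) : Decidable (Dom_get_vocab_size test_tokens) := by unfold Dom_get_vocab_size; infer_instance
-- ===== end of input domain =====

-- B change, one line: B keeps only a running total of per-row split lengths instead of building A's per-token frequency dict and summing it.

-- ===== PORT A =====
-- d = defaultdict(0); for row: for token in row.split(): d[token] += 1; then sum d.values() with a loop.
def get_vocab_size (test_tokens : List String) : Int :=
  let d : PySem.Dict String Int :=
    test_tokens.foldl
      (fun d row => (PySem.Str.split₀ row).foldl (fun d token => d.modify token 0 (· + 1)) d)
      PySem.Dict.empty
  let values := d.values
  values.foldl (fun total v => total + v) 0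

-- ===== PORT B =====
-- total = 0; for row: total += len(row.split()); return total
def get_vocab_size_alt (test_tokens : List String) : Int :=
  test_tokens.foldl (fun total row => total + ((PySem.Str.split₀ row).length : Int)) 0

-- ===== PRECONDITION & SPEC =====
def Spec_get_vocab_size (test_tokens : List String) (out : Int) : Prop := out = get_vocab_size_alt test_tokens
instance (test_tokens : List String) (out : Int) : Decidable (Spec_get_vocab_size test_tokens out) := by unfold Spec_get_vocab_size; infer_instance

-- ===== CLAIM (what is proved, stated in full; the proofs are below) =====
def Claim_equal_get_vocab_size : Prop := ∀ (test_tokens : List String), Dom_get_vocab_size test_tokens → Spec_get_vocab_size test_tokens (get_vocab_size test_tokens)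

-- ===== LEMMAS AND PROOFS =====

-- A's nested loop is the counting loop over the flattened token list.
theorem pv_dict_eq_counter (test_tokens : List String) :
    test_tokens.foldl
      (fun d row => (PySem.Str.split₀ row).foldl (fun d token => d.modify token 0 (· + 1)) d)
      PySem.Dict.empty
    = PySem.Dict.counter (test_tokens.flatMap PySem.Str.split₀) := by
  rw [PySem.Dict.counter_eq_foldl]
  induction test_tokens using List.reverseRecOn with
  | nil => rfl
  | append_singleton xs x ih => simp [List.foldl_append, ih]

-- sum over the distinct elements of the counts is the length
theorem pv_sum_counts (xs : List String) :
    (((PySem.Set.ofList xs).map (fun k => (xs.count k : Int))).foldl (fun total v => total + v) 0)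
    = (xs.length : Int) := by
  have hfold : ∀ (l : List Int) (a : Int), l.foldl (fun t v => t + v) a = a + l.sum := by
    intro l
    induction l with
    | nil => simp
    | cons x t ih => intro a; simp [ih]; ring
  have hperm : List.Perm (PySem.Set.ofList xs) xs.dedup :=
    (List.perm_ext_iff_of_nodup (PySem.Set.nodup_ofList xs) xs.nodup_dedup).mpr
      (by intro a; simp [PySem.Set.mem_ofList, List.mem_dedup])
  rw [hfold, zero_add, (hperm.map _).sum_eq,
    show (fun k => (xs.count k : Int)) = (fun n : ℕ => (n : Int)) ∘ (fun k => xs.count k) from rfl,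
    ← List.map_map, ← Nat.cast_list_sum, List.sum_map_count_dedup_eq_length]

theorem pv_alt_eq (test_tokens : List String) :
    get_vocab_size_alt test_tokens = ((test_tokens.flatMap PySem.Str.split₀).length : Int) := by
  unfold get_vocab_size_alt
  rw [PySem.List.foldl_add (g := fun row => ((PySem.Str.split₀ row).length : Int))]
  simp [List.length_flatMap, List.map_map, Function.comp_def]

-- ===== VERDICT (by name: the statement is the Claim_ definition above) =====
theorem get_vocab_size_spec : Claim_equal_get_vocab_size := by
  intro test_tokens _
  unfold Spec_get_vocab_size get_vocab_size
  rw [pv_dict_eq_counter, pv_alt_eq]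
  simp only [PySem.Dict.values, PySem.Dict.items_counter, List.map_map]
  exact pv_sum_counts _
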